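-- pv_equiv track=rewrite | github.com/dianachmiest/python-learning | 04-12/Zadania/zad2.py | plecak
-- ===== SOURCE A (Python) =====
-- def plecak(przedmioty, pojemnosc):
--     max_wartosc = 0
--     waga_aktualna = 0
--     przedmioty_w_plecaku = []
--     for waga, wartosc in przedmioty:
--         if waga_aktualna + waga <= pojemnosc:
--             waga_aktualna += waga
--             max_wartosc += wartosc
--             przedmioty_w_plecaku.append((waga, wartosc))
--         else:
--             break
--     return max_wartosc, przedmioty_w_plecaku
-- ===== SOURCE B (Python) =====
-- def plecak(przedmioty, pojemnosc):
--     items = list(przedmioty)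
--     if not items:
--         return 0, []
--     waga, wartosc = items[0]
--     if waga <= pojemnosc:
--         sub_wartosc, sub_items = plecak(items[1:], pojemnosc - waga)
--         return wartosc + sub_wartosc, [(waga, wartosc)] + sub_items
--     return 0, []
-- ===== Notes on version B (the rewrite author's own statement) =====
-- stated objective: alternative
-- what changed: B replaces A's single iterative loop carrying running weight/value accumulators with structural recursion on the item list that threads a shrinking remaining capacity downward and combines (value, taken-list) results on the way back up; it keeps no accumulators at all.
import Mathlib
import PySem

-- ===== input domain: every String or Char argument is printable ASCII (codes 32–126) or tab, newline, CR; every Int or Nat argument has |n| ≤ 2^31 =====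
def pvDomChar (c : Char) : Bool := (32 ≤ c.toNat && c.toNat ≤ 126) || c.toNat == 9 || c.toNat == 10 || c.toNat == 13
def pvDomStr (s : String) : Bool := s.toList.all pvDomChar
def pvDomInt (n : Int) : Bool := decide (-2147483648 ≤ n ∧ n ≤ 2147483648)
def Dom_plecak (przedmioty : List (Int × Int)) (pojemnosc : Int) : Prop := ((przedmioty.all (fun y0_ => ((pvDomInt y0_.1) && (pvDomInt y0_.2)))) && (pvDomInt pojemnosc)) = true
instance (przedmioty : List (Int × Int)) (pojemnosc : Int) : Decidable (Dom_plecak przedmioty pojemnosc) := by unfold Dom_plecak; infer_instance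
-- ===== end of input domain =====

-- ===== PORT A =====
-- B replaces A's accumulator loop by structural recursion threading a shrinking remaining capacity (alternative decomposition, same values).
def plecakLoop (pojemnosc : Int) : List (Int × Int) → Int → Int → List (Int × Int) → Int × (List (Int × Int))
  | [], max_wartosc, _, acc => (max_wartosc, acc)
  | (waga, wartosc) :: rest, max_wartosc, waga_aktualna, acc =>
    if waga_aktualna + waga ≤ pojemnosc then
      plecakLoop pojemnosc rest (max_wartosc + wartosc) (waga_aktualna + waga) (acc ++ [(waga, wartosc)])
    else (max_wartosc, acc)

def plecak (przedmioty : List (Int × Int)) (pojemnosc : Int) : Int × (List (Int × Int)) :=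
  plecakLoop pojemnosc przedmioty 0 0 []

-- ===== PORT B =====
def plecak_alt (przedmioty : List (Int × Int)) (pojemnosc : Int) : Int × (List (Int × Int)) :=
  match przedmioty with
  | [] => (0, [])
  | (waga, wartosc) :: rest =>
    if waga ≤ pojemnosc then
      let sub := plecak_alt rest (pojemnosc - waga)
      (wartosc + sub.1, [(waga, wartosc)] ++ sub.2)
    else (0, [])

-- ===== PRECONDITION & SPEC =====
def Spec_plecak (przedmioty : List (Int × Int)) (pojemnosc : Int) (out : Int × (List (Int × Int))) : Prop := out = plecak_alt przedmioty pojemnosc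
instance (przedmioty : List (Int × Int)) (pojemnosc : Int) (out : Int × (List (Int × Int))) : Decidable (Spec_plecak przedmioty pojemnosc out) := by unfold Spec_plecak; infer_instance

-- ===== CLAIM =====
def Claim_equal_plecak : Prop := ∀ (przedmioty : List (Int × Int)) (pojemnosc : Int), Dom_plecak przedmioty pojemnosc → Spec_plecak przedmioty pojemnosc (plecak przedmioty pojemnosc)

-- ===== LEMMAS AND PROOFS =====
theorem plecakLoop_eq_alt (pojemnosc : Int) :
    ∀ (items : List (Int × Int)) (cum maxW : Int) (acc : List (Int × Int)),
    plecakLoop pojemnosc items maxW cum acc =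
      (maxW + (plecak_alt items (pojemnosc - cum)).1,
       acc ++ (plecak_alt items (pojemnosc - cum)).2) := by
  intro items
  induction items with
  | nil => intro cum maxW acc; simp [plecakLoop, plecak_alt]
  | cons hd tl ih =>
    intro cum maxW acc
    obtain ⟨waga, wartosc⟩ := hd
    simp only [plecakLoop, plecak_alt]
    by_cases h : cum + waga ≤ pojemnosc
    · rw [if_pos h, if_pos (by omega)]
      rw [ih (cum + waga) (maxW + wartosc) (acc ++ [(waga, wartosc)])]
      have : pojemnosc - (cum + waga) = pojemnosc - cum - waga := by ring
      rw [this]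
      simp only [List.append_assoc, List.singleton_append, Prod.mk.injEq]
      exact ⟨by ring, trivial⟩
    · rw [if_neg h, if_neg (by omega)]
      simp

-- ===== VERDICT =====
theorem plecak_spec : Claim_equal_plecak := by
  intro przedmioty pojemnosc _
  unfold Spec_plecak plecak
  have := plecakLoop_eq_alt pojemnosc przedmioty 0 0 []
  simpa using this
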